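-- pv_equiv track=rewrite | github.com/pureslurp/PropOptimizer | defensive_scraper.py | _calculate_td_rankings
-- ===== SOURCE A (Python) =====
-- from typing import Dict, List, Optional
--
-- def _calculate_td_rankings(td_stats: Dict[str, Dict[str, int]]) -> Dict[str, Dict[str, int]]:
--     """
--     Calculate rankings for TD statistics (fewer TDs allowed = better ranking)
--     Uses average rank for ties, rounded to nearest whole number
--     """
--     rankings = {}
--
--     # Map raw stat names to rank stat names
--     td_stat_to_rank = {
--         'Passing TDs Allowed': 'Passing TDs Allowed',  # Will be used for ranking lookup
--         'Rushing TDs Allowed': 'Rushing TDs Allowed'   # Will be used for ranking lookup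
--     }
--
--     for stat_name in td_stat_to_rank.keys():
--         # Get all teams that have this stat
--         teams_with_stat = {team: stats.get(stat_name, 999)
--                          for team, stats in td_stats.items()
--                          if stat_name in stats}
--
--         if not teams_with_stat:
--             continue
--
--         # Sort teams by TDs allowed (ascending = better defense, fewer TDs = rank 1)
--         sorted_teams = sorted(teams_with_stat.items(), key=lambda x: x[1])
--
--         # Assign rankings with tie handling (average rank for tied teams)
--         current_position = 1
--         i = 0
--         while i < len(sorted_teams):
--             # Find all teams tied with the current team
--             current_td_count = sorted_teams[i][1]
--             tied_teams = []
--             j = i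
--             while j < len(sorted_teams) and sorted_teams[j][1] == current_td_count:
--                 tied_teams.append(sorted_teams[j][0])
--                 j += 1
--
--             # Calculate average rank for tied teams
--             # If teams occupy positions current_position through (current_position + num_tied - 1)
--             num_tied = len(tied_teams)
--             if num_tied == 1:
--                 avg_rank = current_position
--             else:
--                 # Calculate mean of all positions they occupy
--                 positions = list(range(current_position, current_position + num_tied))
--                 avg_rank = round(sum(positions) / len(positions))
--
--             # Assign the average rank to all tied teams
--             for team_name in tied_teams:
--                 if team_name not in rankings:
--                     rankings[team_name] = {}
--                 rankings[team_name][stat_name] = avg_rank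
--
--             # Move to next group
--             current_position += num_tied
--             i = j
--
--     return rankings
-- ===== SOURCE B (Python) =====
-- def _calculate_td_rankings(td_stats):
--     """Group teams by TD count in one pass, then rank over the sorted distinct counts."""
--     rankings = {}
--     for stat_name in ('Passing TDs Allowed', 'Rushing TDs Allowed'):
--         groups = {}
--         for team, stats in td_stats.items():
--             if stat_name in stats:
--                 groups.setdefault(stats[stat_name], []).append(team)
--         pos = 1
--         for count in sorted(groups):
--             teams = groups[count]
--             n = len(teams)
--             rank = pos if n == 1 else round((2 * pos + n - 1) / 2)
--             for team in teams:
--                 rankings.setdefault(team, {})[stat_name] = rank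
--             pos += n
--     return rankings
-- ===== Notes on version B (the rewrite author's own statement) =====
-- stated objective: simpler
-- what changed: B replaces A's sort of all (team, count) pairs plus an index-driven inner while-loop that scans for tie runs by a single setdefault pass building a dict count -> [teams], then one fold over the sorted distinct counts computing each group's rounded average rank in closed form round((2*pos+n-1)/2).
import Mathlib
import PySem

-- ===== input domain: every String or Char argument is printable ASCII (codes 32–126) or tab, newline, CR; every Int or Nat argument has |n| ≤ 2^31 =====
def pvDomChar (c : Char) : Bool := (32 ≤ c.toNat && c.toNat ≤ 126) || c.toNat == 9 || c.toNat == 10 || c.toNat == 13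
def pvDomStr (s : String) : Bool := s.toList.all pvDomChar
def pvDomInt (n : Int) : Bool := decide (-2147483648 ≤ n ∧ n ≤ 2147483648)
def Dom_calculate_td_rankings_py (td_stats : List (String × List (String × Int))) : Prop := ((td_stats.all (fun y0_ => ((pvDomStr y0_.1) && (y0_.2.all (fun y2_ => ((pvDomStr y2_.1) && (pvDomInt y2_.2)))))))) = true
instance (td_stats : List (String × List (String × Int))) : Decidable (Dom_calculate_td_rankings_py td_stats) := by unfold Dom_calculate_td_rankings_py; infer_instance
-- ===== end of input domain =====

-- B replaces A's sort-all-teams + tie-run scanning by a one-pass dict of count → teams and a fold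
-- over the sorted distinct counts (objective: simpler decomposition, same asymptotic cost).

-- Python's round(s / n) for the only case either program reaches: s/n is an integer or an exact
-- half-integer (s is a sum of n consecutive integers, resp. n = 2); float division is exact there
-- and round() uses round-half-to-even, so this hand-written integer port is exact on that domain.
def pyRoundHalfDiv (s n : Int) : Int :=
  let q := PySem.Int.floordiv s n
  if s = q * n then q else if PySem.Int.mod q 2 = 0 then q else q + 1

-- ===== PORT A =====
-- the two nested while loops: consume the run of teams tied at the current TD count, assign the
-- (rounded) average of the positions they occupy, continue after the run
def aLoop (stat : String) : List (String × Int) → Int → PySem.Dict String (PySem.Dict String Int) → PySem.Dict String (PySem.Dict String Int)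
  | [], _, r => r
  | (t, c) :: rest, cp, r =>
    let tied := t :: (rest.takeWhile (fun p => p.2 == c)).map Prod.fst
    let n : Int := tied.length
    let avg := if tied.length == 1 then cp
      else pyRoundHalfDiv ((PySem.List.pyRange cp (cp + n)).foldl (fun acc x => acc + x) 0) n
    -- 'if team not in rankings: rankings[team] = {}; rankings[team][stat] = avg' is exactly dict
    -- modify with default {} (PySem.Dict.modify)
    let r' := tied.foldl (fun racc tm => racc.modify tm PySem.Dict.empty (fun d => d.insert stat avg)) r
    aLoop stat (rest.dropWhile (fun p => p.2 == c)) (cp + n) r'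
termination_by s _ _ => s.length
decreasing_by simpa using Nat.lt_succ_of_le (List.length_dropWhile_le _ _)

-- one iteration of A's 'for stat_name in td_stat_to_rank.keys()' loop
def aPass (td_stats : List (String × List (String × Int))) (r : PySem.Dict String (PySem.Dict String Int)) (stat_name : String) : PySem.Dict String (PySem.Dict String Int) :=
  let teams_with_stat := (td_stats.foldl (fun d p =>
      if (PySem.Dict.mk p.2).contains stat_name then
        d.insert p.1 ((PySem.Dict.mk p.2).getD stat_name 999) else d)
    PySem.Dict.empty).items
  if teams_with_stat = [] then r
  else aLoop stat_name (PySem.List.sorted teams_with_stat (fun x => x.2)) 1 r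

def calculate_td_rankings_py (td_stats : List (String × List (String × Int))) : List (String × List (String × Int)) :=
  (((["Passing TDs Allowed", "Rushing TDs Allowed"]).foldl (aPass td_stats) PySem.Dict.empty).items).map (fun p => (p.1, p.2.items))

-- ===== PORT B =====
-- one iteration of B's loop over the two stat names: group teams by count in one pass
-- (groups.setdefault(count, []).append(team)), then rank the sorted distinct counts
def bPass (td_stats : List (String × List (String × Int))) (r : PySem.Dict String (PySem.Dict String Int)) (stat_name : String) : PySem.Dict String (PySem.Dict String Int) :=
  let groups := td_stats.foldl (fun d p =>
      match (PySem.Dict.mk p.2).get? stat_name with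
      | some c => d.modify c [] (fun l => l ++ [p.1])
      | none => d) PySem.Dict.empty
  ((PySem.List.sorted groups.keys (fun c => c)).foldl (fun acc c =>
      let teams := groups.getD c []
      let n : Int := teams.length
      let rank := if teams.length == 1 then acc.2 else pyRoundHalfDiv (2 * acc.2 + n - 1) 2
      ((teams.foldl (fun racc tm => racc.modify tm PySem.Dict.empty (fun d => d.insert stat_name rank)) acc.1),
       acc.2 + n)) (r, 1)).1

def calculate_td_rankings_py_alt (td_stats : List (String × List (String × Int))) : List (String × List (String × Int)) :=
  (((["Passing TDs Allowed", "Rushing TDs Allowed"]).foldl (bPass td_stats) PySem.Dict.empty).items).map (fun p => (p.1, p.2.items))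

-- ===== PRECONDITION & SPEC =====
-- Pre_ excludes association lists with duplicate team keys or duplicate stat keys: the Python
-- argument is a dict of dicts, which cannot contain duplicate keys, and on raw duplicate-key
-- lists dict semantics (overwrite vs. keep both) are ambiguous.
def Pre_calculate_td_rankings_py (td_stats : List (String × List (String × Int))) : Prop :=
  (td_stats.map Prod.fst).Nodup ∧ ∀ p ∈ td_stats, (p.2.map Prod.fst).Nodup
instance (td_stats : List (String × List (String × Int))) : Decidable (Pre_calculate_td_rankings_py td_stats) := by unfold Pre_calculate_td_rankings_py; infer_instance

def pvWitness_calculate_td_rankings_py : (List (String × List (String × Int))) :=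
  [("TB", [("Passing TDs Allowed", 2), ("Rushing TDs Allowed", 1)]),
   ("KC", [("Passing TDs Allowed", 2)]),
   ("NE", [("Rushing TDs Allowed", 1)])]

def Spec_calculate_td_rankings_py (td_stats : List (String × List (String × Int))) (out : List (String × List (String × Int))) : Prop := out = calculate_td_rankings_py_alt td_stats
instance (td_stats : List (String × List (String × Int))) (out : List (String × List (String × Int))) : Decidable (Spec_calculate_td_rankings_py td_stats out) := by unfold Spec_calculate_td_rankings_py; infer_instance

-- ===== CLAIM (what is proved, stated in full; the proofs are below) =====
def Claim_equal_calculate_td_rankings_py : Prop := ∀ (td_stats : List (String × List (String × Int))), Dom_calculate_td_rankings_py td_stats → Pre_calculate_td_rankings_py td_stats → Spec_calculate_td_rankings_py td_stats (calculate_td_rankings_py td_stats)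

-- ===== LEMMAS AND PROOFS =====

-- the filtered (team, count) list both passes are about
def pvL (td_stats : List (String × List (String × Int))) (stat : String) : List (String × Int) :=
  (td_stats.filter (fun p => (PySem.Dict.mk p.2).contains stat)).map
    (fun p => (p.1, (PySem.Dict.mk p.2).getD stat 999))

-- ---- small insertBy facts ----
theorem pvInsertBy_nil {α : Type} (bef : α → α → Bool) (x : α) :
    PySem.List.insertBy bef x [] = [x] := rfl

theorem pvInsertBy_cons {α : Type} (bef : α → α → Bool) (x y : α) (ys : List α) :
    PySem.List.insertBy bef x (y :: ys) =
      if bef x y then x :: y :: ys else y :: PySem.List.insertBy bef x ys := rfl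

theorem pvInsertBy_append_not {α : Type} (bef : α → α → Bool) (x : α) :
    ∀ (g t : List α), (∀ y ∈ g, bef x y = false) →
      PySem.List.insertBy bef x (g ++ t) = g ++ PySem.List.insertBy bef x t := by
  intro g
  induction g with
  | nil => intro t _; simp
  | cons y g ih =>
    intro t h
    have hy : bef x y = false := h y (by simp)
    simp only [List.cons_append, pvInsertBy_cons, hy, Bool.false_eq_true, if_false]
    rw [ih t (fun z hz => h z (by simp [hz]))]

theorem pvInsertBy_all_true {α : Type} (bef : α → α → Bool) (x : α) :
    ∀ (t : List α), (∀ y ∈ t, bef x y = true) →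
      PySem.List.insertBy bef x t = x :: t := by
  intro t h
  cases t with
  | nil => rfl
  | cons y ys => simp [pvInsertBy_cons, h y (by simp)]

theorem pvInsertBy_perm {α : Type} (bef : α → α → Bool) (x : α) :
    ∀ (t : List α), (PySem.List.insertBy bef x t).Perm (x :: t) := by
  intro t
  induction t with
  | nil => simp [pvInsertBy_nil]
  | cons y ys ih =>
    rw [pvInsertBy_cons]
    split
    · exact List.Perm.refl _
    · exact (List.Perm.cons y ih).trans (List.Perm.swap x y ys)

theorem pvInsertBy_lt_pairwise (k : Int) :
    ∀ (cs : List Int), cs.Pairwise (· < ·) → k ∉ cs →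
      (PySem.List.insertBy (fun a b => decide (a < b)) k cs).Pairwise (· < ·) := by
  intro cs
  induction cs with
  | nil => intro _ _; simp [pvInsertBy_nil]
  | cons c cs ih =>
    intro hp hk
    have hpc := (List.pairwise_cons.mp hp).1
    have hpt := (List.pairwise_cons.mp hp).2
    rw [pvInsertBy_cons]
    by_cases h : k < c
    · simp only [decide_eq_true_eq, h, if_true]
      refine List.pairwise_cons.mpr ⟨?_, hp⟩
      intro b hb
      rcases hb with _ | hb
      · exact h
      · exact lt_trans h (hpc b (by assumption))
    · simp only [decide_eq_true_eq, h, if_false]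
      refine List.pairwise_cons.mpr ⟨?_, ih hpt (fun hm => hk (by simp [hm]))⟩
      intro b hb
      have hb2 := (pvInsertBy_perm (fun a b => decide (a < b)) k cs).mem_iff.mp hb
      rcases List.mem_cons.mp hb2 with rfl | hb3
      · have : b ≠ c := fun he => hk (by simp [he])
        omega
      · exact hpc b hb3

theorem pvFlatMap_congr_mem {α β : Type} (cs : List α) (f g : α → List β)
    (h : ∀ c ∈ cs, f c = g c) : cs.flatMap f = cs.flatMap g := by
  induction cs with
  | nil => rfl
  | cons c cs ih =>
    simp only [List.flatMap_cons]
    rw [h c (by simp), ih (fun c' hc' => h c' (by simp [hc']))]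

-- ---- inserting one element into a flatMap of groups over strictly increasing values ----
theorem pvInsFlat_mem (x : String × Int) (G : Int → List (String × Int))
    (hG : ∀ c, ∀ q ∈ G c, q.2 = c) :
    ∀ (cs : List Int), cs.Pairwise (· < ·) → x.2 ∈ cs →
      PySem.List.insertBy (fun a b => decide (a.2 < b.2)) x (cs.flatMap G) =
        cs.flatMap (fun c => G c ++ if c = x.2 then [x] else []) := by
  intro cs
  induction cs with
  | nil => intro _ h; simp at h
  | cons c cs ih =>
    intro hp hmem
    have hpc := (List.pairwise_cons.mp hp).1
    have hpt := (List.pairwise_cons.mp hp).2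
    simp only [List.flatMap_cons]
    by_cases hc : x.2 = c
    · rw [pvInsertBy_append_not _ _ _ _ (fun y hy => by
        have := hG c y hy
        simp [this, hc])]
      rw [pvInsertBy_all_true _ _ _ (fun y hy => by
        obtain ⟨c', hc', hyc'⟩ := List.mem_flatMap.mp hy
        have h1 := hG c' y hyc'
        have h2 := hpc c' hc'
        simp [h1]; omega)]
      have hrest : cs.flatMap (fun c' => G c' ++ if c' = x.2 then [x] else []) = cs.flatMap G := by
        apply pvFlatMap_congr_mem
        intro c' hc'
        have : c' ≠ x.2 := by have := hpc c' hc'; omega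
        simp [this]
      rw [hrest]
      simp [hc]
    · have hmem' : x.2 ∈ cs := by
        rcases List.mem_cons.mp hmem with h | h
        · exact absurd h hc
        · exact h
      have hck : c < x.2 := hpc _ hmem'
      rw [pvInsertBy_append_not _ _ _ _ (fun y hy => by
        have := hG c y hy
        simp [this]; omega)]
      rw [ih hpt hmem']
      have : c ≠ x.2 := by omega
      simp [this]

theorem pvInsFlat_not_mem (x : String × Int) (G : Int → List (String × Int))
    (hG : ∀ c, ∀ q ∈ G c, q.2 = c) (hGx : G x.2 = []) :
    ∀ (cs : List Int), cs.Pairwise (· < ·) → x.2 ∉ cs →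
      PySem.List.insertBy (fun a b => decide (a.2 < b.2)) x (cs.flatMap G) =
        (PySem.List.insertBy (fun a b => decide (a < b)) x.2 cs).flatMap
          (fun c => G c ++ if c = x.2 then [x] else []) := by
  intro cs
  induction cs with
  | nil => simp [pvInsertBy_nil, hGx]
  | cons c cs ih =>
    intro hp hk
    have hpc := (List.pairwise_cons.mp hp).1
    have hpt := (List.pairwise_cons.mp hp).2
    have hck : x.2 ≠ c := fun h => hk (by simp [h])
    rw [pvInsertBy_cons]
    by_cases h : x.2 < c
    · simp only [decide_eq_true_eq, h, if_true]
      rw [pvInsertBy_all_true _ _ _ (fun y hy => by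
        simp only [List.flatMap_cons, List.mem_append] at hy
        rcases hy with hy | hy
        · have := hG c y hy; simp [this]; omega
        · obtain ⟨c', hc', hyc'⟩ := List.mem_flatMap.mp hy
          have h1 := hG c' y hyc'
          have h2 := hpc c' hc'
          simp [h1]; omega)]
      have h1 : (c :: cs).flatMap (fun c' => G c' ++ if c' = x.2 then [x] else []) =
          (c :: cs).flatMap G := by
        apply pvFlatMap_congr_mem
        intro c' hc'
        rcases hc' with _ | hc'
        · simp [Ne.symm hck]
        · have : c < c' := hpc c' (by assumption)
          have : c' ≠ x.2 := by omega
          simp [this]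
      simp only [List.flatMap_cons] at h1 ⊢
      rw [h1, hGx]
      simp
    · simp only [decide_eq_true_eq, h, if_false]
      have hck' : c < x.2 := by omega
      simp only [List.flatMap_cons]
      rw [pvInsertBy_append_not _ _ _ _ (fun y hy => by
        have := hG c y hy; simp [this]; omega)]
      rw [ih hpt (fun hm => hk (by simp [hm]))]
      have : c ≠ x.2 := by omega
      simp [this]

-- ---- Python's stable sort by value = flatMap of the per-value groups over sorted distinct values ----
theorem pvSorted_append_singleton (L : List (String × Int)) (x : String × Int) :
    PySem.List.sorted (L ++ [x]) (fun p => p.2) =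
      PySem.List.insertBy (fun a b => decide (a.2 < b.2)) x
        (PySem.List.sorted L (fun p => p.2)) := by
  rw [PySem.List.sorted_eq_foldl_insertBy, PySem.List.sorted_eq_foldl_insertBy, List.foldl_append]
  rfl

theorem pvSorted_flatMap (L : List (String × Int)) :
    PySem.List.sorted L (fun p => p.2) =
      (PySem.List.sorted (PySem.Set.ofList (L.map Prod.snd)) (fun c => c)).flatMap
        (fun c => L.filter (fun q => q.2 == c)) := by
  induction L using List.reverseRecOn with
  | nil => simp [(PySem.List.sorted_eq_nil_iff ([] : List (String × Int)) (fun p => p.2) false).mpr rfl,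
                 (PySem.List.sorted_eq_nil_iff ([] : List Int) (fun c => c) false).mpr rfl,
                 PySem.Set.ofList]
  | append_singleton L x ih =>
    rw [pvSorted_append_singleton, ih]
    have hmap : (L ++ [x]).map Prod.snd = L.map Prod.snd ++ [x.2] := by simp
    rw [hmap, PySem.Set.ofList_append_singleton]
    have hGfun : (fun c => (L ++ [x]).filter (fun q => q.2 == c)) =
        (fun c => L.filter (fun q => q.2 == c) ++ if c = x.2 then [x] else []) := by
      funext c
      rw [List.filter_append, List.filter_singleton]
      congr 1
      by_cases h : x.2 = c
      · simp [h]
      · have h2 : ¬ c = x.2 := fun hh => h hh.symm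
        have hb : (x.2 == c) = false := by simpa using h
        simp [h2, hb]
    have hG : ∀ c, ∀ q ∈ L.filter (fun q => q.2 == c), q.2 = c := by
      intro c q hq
      simpa using (List.of_mem_filter hq)
    by_cases hx : x.2 ∈ L.map Prod.snd
    · rw [PySem.Set.add_of_mem ((PySem.Set.mem_ofList _ _).mpr hx)]
      rw [hGfun]
      exact pvInsFlat_mem x _ hG _ (PySem.List.sorted_ofList_pairwise_lt _)
        ((PySem.List.mem_sorted _ _ _ _).mpr ((PySem.Set.mem_ofList _ _).mpr hx))
    · have hGx : L.filter (fun q => q.2 == x.2) = [] := by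
        rw [List.filter_eq_nil_iff]
        intro q hq hq2
        exact hx (List.mem_map.mpr ⟨q, hq, by simpa using hq2⟩)
      have hins : PySem.List.sorted ((PySem.Set.ofList (L.map Prod.snd)).add x.2) (fun c => c) =
          PySem.List.insertBy (fun a b => decide (a < b)) x.2
            (PySem.List.sorted (PySem.Set.ofList (L.map Prod.snd)) (fun c => c)) := by
        apply PySem.List.sorted_eq_of_perm_of_pairwise_lt
        · refine (pvInsertBy_perm _ _ _).trans ?_
          rw [PySem.Set.add_of_not_mem (fun h => hx ((PySem.Set.mem_ofList _ _).mp h))]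
          exact ((PySem.List.sorted_perm _ _ _).cons x.2).trans
            (List.perm_append_singleton x.2 _).symm
        · exact pvInsertBy_lt_pairwise _ _ (PySem.List.sorted_ofList_pairwise_lt _)
            (fun h => hx ((PySem.Set.mem_ofList _ _).mp
              ((PySem.List.mem_sorted _ _ _ _).mp h)))
      rw [hins, hGfun]
      exact pvInsFlat_not_mem x _ hG hGx _ (PySem.List.sorted_ofList_pairwise_lt _)
        (fun h => hx ((PySem.Set.mem_ofList _ _).mp ((PySem.List.mem_sorted _ _ _ _).mp h)))

-- ---- A's dict comprehension builds exactly the filtered (team, count) list ----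
theorem pvFoldl_ite_insert {α : Type} (cond : α → Bool) (k : α → String) (v : α → Int) :
    ∀ (td : List α) (d : PySem.Dict String Int),
      td.foldl (fun d p => if cond p then d.insert (k p) (v p) else d) d =
        (td.filter cond).foldl (fun d p => d.insert (k p) (v p)) d := by
  intro td
  induction td with
  | nil => intro d; rfl
  | cons p td ih =>
    intro d
    by_cases h : cond p <;> simp [h, ih]

theorem pvTws_eq (td : List (String × List (String × Int))) (stat : String)
    (hnd : (td.map Prod.fst).Nodup) :
    (td.foldl (fun d p => if (PySem.Dict.mk p.2).contains stat then
        d.insert p.1 ((PySem.Dict.mk p.2).getD stat 999) else d) PySem.Dict.empty).items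
      = pvL td stat := by
  rw [pvFoldl_ite_insert (fun p => (PySem.Dict.mk p.2).contains stat) Prod.fst
        (fun p => (PySem.Dict.mk p.2).getD stat 999)]
  have hnd2 : ((td.filter (fun p => (PySem.Dict.mk p.2).contains stat)).map Prod.fst).Nodup :=
    hnd.sublist (List.Sublist.map Prod.fst List.filter_sublist)
  rw [PySem.Dict.items_foldl_insert_fresh _ Prod.fst
        (fun p => (PySem.Dict.mk p.2).getD stat 999) _
        (fun a _ => PySem.Dict.contains_empty _) hnd2]
  simp [pvL, PySem.Dict.empty]

-- ---- B's grouping loop, rewritten over the same filtered list ----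
theorem pvBgroups_eq (stat : String) :
    ∀ (td : List (String × List (String × Int))) (d : PySem.Dict Int (List String)),
      td.foldl (fun d p => match (PySem.Dict.mk p.2).get? stat with
          | some c => d.modify c [] (fun l => l ++ [p.1]) | none => d) d =
        ((pvL td stat).map (fun q => (q.2, q.1))).foldl
          (fun d p => d.modify p.1 [] (fun l => l ++ [p.2])) d := by
  intro td
  induction td with
  | nil => intro d; rfl
  | cons p td ih =>
    intro d
    cases h : (PySem.Dict.mk p.2).get? stat with
    | none =>
      have hc : (PySem.Dict.mk p.2).contains stat = false :=
        (PySem.Dict.get?_eq_none_iff_contains _ _).mp h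
      simp only [List.foldl_cons, h, pvL, List.filter_cons, hc]
      simpa only [pvL] using ih d
    | some c =>
      have hc : (PySem.Dict.mk p.2).contains stat = true := by
        rw [PySem.Dict.contains_eq_isSome_get?, h]; rfl
      have hg : (PySem.Dict.mk p.2).getD stat 999 = c :=
        PySem.Dict.getD_of_get?_eq_some _ _ h
      simp only [List.foldl_cons, h, pvL, List.filter_cons, hc, if_true, List.map_cons, hg]
      simpa only [pvL] using ih (d.modify c [] (fun l => l ++ [p.1]))

theorem pvGroups_getD (L : List (String × Int)) (c : Int) :
    ((L.map (fun q => (q.2, q.1))).foldl (fun d p => d.modify p.1 [] (fun l => l ++ [p.2]))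
        PySem.Dict.empty).getD c []
      = (L.filter (fun q => q.2 == c)).map Prod.fst := by
  rw [PySem.Dict.getD_foldl_modify_append]
  simp [List.filter_map, Function.comp_def]

theorem pvGroups_keys (L : List (String × Int)) :
    ((L.map (fun q => (q.2, q.1))).foldl (fun d p => d.modify p.1 [] (fun l => l ++ [p.2]))
        PySem.Dict.empty).keys
      = PySem.Set.ofList (L.map Prod.snd) := by
  have h := PySem.Dict.keys_foldl_modify_key (L.map (fun q => (q.2, q.1))) Prod.fst
    ([] : List String) (fun d p => fun l => l ++ [p.2]) PySem.Dict.empty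
  simpa [PySem.Dict.keys_empty, PySem.Set.update_nil_left, List.map_map, Function.comp_def] using h

-- ---- the rounded average of n consecutive positions, closed form ----
theorem pvSum_pyRange : ∀ (n : Nat) (a : Int),
    2 * (PySem.List.pyRange a (a + (n : Int))).sum = n * (2 * a + n - 1) := by
  intro n
  induction n with
  | zero => intro a; simp [PySem.List.pyRange]
  | succ n ih =>
    intro a
    rw [PySem.List.pyRange_one_cons (by omega : a < a + ((n + 1 : Nat) : Int))]
    have h1 : a + ((n + 1 : Nat) : Int) = (a + 1) + (n : Int) := by push_cast; ring
    rw [h1, List.sum_cons]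
    have := ih (a + 1)
    push_cast
    push_cast at this
    linarith

theorem pvFoldl_sum (l : List Int) : l.foldl (fun acc x => acc + x) 0 = l.sum := by
  simpa using PySem.List.foldl_add l (fun x => x) 0

theorem pvRound_avg (cp : Int) (n : Nat) (h2 : 2 ≤ n) :
    pyRoundHalfDiv ((PySem.List.pyRange cp (cp + (n : Int))).foldl (fun acc x => acc + x) 0) (n : Int)
      = pyRoundHalfDiv (2 * cp + (n : Int) - 1) 2 := by
  rw [pvFoldl_sum]
  set s := (PySem.List.pyRange cp (cp + (n : Int))).sum with hsdef
  have hs : 2 * s = n * (2 * cp + n - 1) := pvSum_pyRange n cp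
  set N : Int := (n : Int) with hNdef
  have hN : 0 < N := by omega
  set M : Int := 2 * cp + N - 1 with hMdef
  set q : Int := PySem.Int.floordiv M 2 with hqdef
  have hqb : q * 2 ≤ M ∧ M < (q + 1) * 2 :=
    (PySem.Int.floordiv_eq_iff_of_pos (by norm_num)).mp rfl
  rcases (by omega : M = 2 * q ∨ M = 2 * q + 1) with hM | hM
  · have hsq : s = q * N := by nlinarith
    have hfs : PySem.Int.floordiv s N = q :=
      (PySem.Int.floordiv_eq_iff_of_pos hN).mpr (by constructor <;> nlinarith)
    unfold pyRoundHalfDiv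
    rw [hfs, ← hqdef]
    simp [hsq, hM, mul_comm]
  · have hseq : 2 * s = 2 * (N * q) + N := by nlinarith
    have hfs : PySem.Int.floordiv s N = q :=
      (PySem.Int.floordiv_eq_iff_of_pos hN).mpr (by constructor <;> nlinarith)
    have hs_ne : ¬ s = q * N := by intro h; rw [h, mul_comm q N] at hseq; omega
    have hM_ne : ¬ M = q * 2 := by omega
    unfold pyRoundHalfDiv
    rw [hfs, ← hqdef]
    simp [hs_ne, hM_ne]

-- ---- takeWhile / dropWhile over a run followed by a different value ----
theorem pvTakeWhile_all {α : Type} (p : α → Bool) :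
    ∀ (l₁ l₂ : List α), (∀ a ∈ l₁, p a = true) →
      (l₁ ++ l₂).takeWhile p = l₁ ++ l₂.takeWhile p := by
  intro l₁
  induction l₁ with
  | nil => intro l₂ _; rfl
  | cons a l₁ ih =>
    intro l₂ h
    have ha := h a (by simp)
    simp [ha, ih l₂ (fun b hb => h b (by simp [hb]))]

theorem pvDropWhile_all {α : Type} (p : α → Bool) :
    ∀ (l₁ l₂ : List α), (∀ a ∈ l₁, p a = true) →
      (l₁ ++ l₂).dropWhile p = l₂.dropWhile p := by
  intro l₁
  induction l₁ with
  | nil => intro l₂ _; rfl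
  | cons a l₁ ih =>
    intro l₂ h
    have ha := h a (by simp)
    simp [ha, ih l₂ (fun b hb => h b (by simp [hb]))]

theorem pvFlat_stop (L : List (String × Int)) (c : Int) :
    ∀ (cs : List Int), (∀ c' ∈ cs, c < c') →
      (∀ c' ∈ cs, L.filter (fun q => q.2 == c') ≠ []) →
      (cs.flatMap (fun c' => L.filter (fun q => q.2 == c'))).takeWhile (fun p => p.2 == c) = [] ∧
      (cs.flatMap (fun c' => L.filter (fun q => q.2 == c'))).dropWhile (fun p => p.2 == c) =
        cs.flatMap (fun c' => L.filter (fun q => q.2 == c')) := by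
  intro cs
  cases cs with
  | nil => intro _ _; simp
  | cons c₁ cs =>
    intro hlt hne
    obtain ⟨q, t, hq⟩ := List.exists_cons_of_ne_nil (hne c₁ (by simp))
    have hq1 : q ∈ L.filter (fun q => q.2 == c₁) := by rw [hq]; simp
    have hq2 : q.2 = c₁ := by simpa using List.of_mem_filter hq1
    have hfalse : (q.2 == c) = false := by
      have := hlt c₁ (by simp)
      simp [hq2]; omega
    simp only [List.flatMap_cons, hq, List.cons_append, List.takeWhile_cons, List.dropWhile_cons,
      hfalse]
    simp

-- ---- A's tie-run loop over the grouped list = B's fold over the distinct counts ----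
theorem pvALoop_eq (stat : String) (L : List (String × Int)) :
    ∀ (cs : List Int), cs.Pairwise (· < ·) →
      (∀ c ∈ cs, L.filter (fun q => q.2 == c) ≠ []) →
      ∀ (r : PySem.Dict String (PySem.Dict String Int)) (cp : Int),
      aLoop stat (cs.flatMap (fun c => L.filter (fun q => q.2 == c))) cp r =
      (cs.foldl (fun acc c =>
        let teams := (L.filter (fun q => q.2 == c)).map Prod.fst
        let n : Int := teams.length
        let rank := if teams.length == 1 then acc.2 else pyRoundHalfDiv (2 * acc.2 + n - 1) 2
        ((teams.foldl (fun racc tm => racc.modify tm PySem.Dict.empty (fun d => d.insert stat rank)) acc.1),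
         acc.2 + n)) (r, cp)).1 := by
  intro cs
  induction cs with
  | nil =>
    intro _ _ r cp
    simp [aLoop]
  | cons c cs ih =>
    intro hp hne r cp
    have hpc := (List.pairwise_cons.mp hp).1
    have hpt := (List.pairwise_cons.mp hp).2
    obtain ⟨q, t, hgc⟩ := List.exists_cons_of_ne_nil (hne c (by simp))
    obtain ⟨tn, cv⟩ := q
    have hcv : cv = c := by
      have : (tn, cv) ∈ L.filter (fun q => q.2 == c) := by rw [hgc]; simp
      simpa using List.of_mem_filter this
    subst hcv
    have ht : ∀ p ∈ t, (p.2 == cv) = true := by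
      intro p hp2
      have : p ∈ L.filter (fun q => q.2 == cv) := by rw [hgc]; simp [hp2]
      simpa using List.of_mem_filter this
    have hstop := pvFlat_stop L cv cs hpc (fun c2 hc2 => hne c2 (by simp [hc2]))
    simp only [List.flatMap_cons, hgc, List.cons_append]
    rw [aLoop]
    rw [pvTakeWhile_all _ t _ ht, hstop.1, pvDropWhile_all _ t _ ht, hstop.2]
    simp only [List.foldl_cons, List.append_nil]
    have hne2 : ∀ c2 ∈ cs, L.filter (fun q => q.2 == c2) ≠ [] :=
      fun c2 hc2 => hne c2 (by simp [hc2])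
    have hteams : (L.filter (fun q => q.2 == cv)).map Prod.fst = tn :: t.map Prod.fst := by
      rw [hgc]; rfl
    rw [hteams]
    have havg :
        (if ((tn :: t.map Prod.fst).length == 1) = true then cp
         else pyRoundHalfDiv
            ((PySem.List.pyRange cp (cp + ((tn :: t.map Prod.fst).length : Int))).foldl
              (fun acc x => acc + x) 0)
            ((tn :: t.map Prod.fst).length : Int))
        = (if ((tn :: t.map Prod.fst).length == 1) = true then cp
           else pyRoundHalfDiv (2 * cp + ((tn :: t.map Prod.fst).length : Int) - 1) 2) := by
      by_cases h1 : t.length = 0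
      · rcases List.length_eq_zero_iff.mp h1 with rfl
        simp
      · have h0 : t.length + 1 ≠ 1 := by omega
        have h2 : ((t.length + 1) == 1) = false := beq_eq_false_iff_ne.mpr h0
        simp only [List.length_cons, List.length_map, h2, Bool.false_eq_true, if_false]
        exact_mod_cast pvRound_avg cp (t.length + 1) (by omega)
    rw [havg]
    exact ih hpt hne2 _ _

-- ---- one stat pass of A = one stat pass of B ----
theorem pvPass_eq (td : List (String × List (String × Int))) (stat : String)
    (r : PySem.Dict String (PySem.Dict String Int))
    (hnd : (td.map Prod.fst).Nodup) : aPass td r stat = bPass td r stat := by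
  unfold aPass bPass
  rw [pvTws_eq td stat hnd, pvBgroups_eq stat td]
  dsimp only []
  rw [pvGroups_keys (pvL td stat)]
  by_cases h : pvL td stat = []
  · rw [h]
    simp [PySem.Set.ofList,
      (PySem.List.sorted_eq_nil_iff ([] : List Int) (fun c => c) false).mpr rfl]
  · rw [if_neg h, pvSorted_flatMap (pvL td stat)]
    have hpw := PySem.List.sorted_ofList_pairwise_lt ((pvL td stat).map Prod.snd)
    have hne : ∀ c ∈ PySem.List.sorted (PySem.Set.ofList ((pvL td stat).map Prod.snd)) (fun c => c),
        (pvL td stat).filter (fun q => q.2 == c) ≠ [] := by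
      intro c hc
      have hc2 : c ∈ (pvL td stat).map Prod.snd :=
        (PySem.Set.mem_ofList _ _).mp ((PySem.List.mem_sorted _ _ _ _).mp hc)
      obtain ⟨q, hq, hq2⟩ := List.mem_map.mp hc2
      exact List.ne_nil_of_mem (List.mem_filter.mpr ⟨hq, by simp [hq2]⟩)
    rw [pvALoop_eq stat (pvL td stat) _ hpw hne r 1]
    congr 1
    apply PySem.List.foldl_congr_mem
    intro acc c hc
    rw [pvGroups_getD (pvL td stat) c]

-- ===== VERDICT (by name: the statement is the Claim_ definition above) =====
theorem calculate_td_rankings_py_spec : Claim_equal_calculate_td_rankings_py := by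
  intro td hdom hpre
  unfold Spec_calculate_td_rankings_py calculate_td_rankings_py calculate_td_rankings_py_alt
  simp only [List.foldl_cons, List.foldl_nil]
  rw [pvPass_eq td _ _ hpre.1, pvPass_eq td _ _ hpre.1]
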